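-- pv_equiv track=rewrite | github.com/d1zm4as/CodeWars | Python/encrypti_this.py | sosa
-- ===== SOURCE A (Python) =====
-- def sosa(s):
--     if not s:return ""
--     copy = ""
--
--     pri = str(ord(s[0]))
--     if len(s)==1:
--         return pri
--     seg = s[1]
--
--     tam = len(s)-1
--     ul = s[tam]
--
--     for idx,x in enumerate(s):
--         if idx == 0:
--             copy+=pri
--         elif idx ==1:
--             copy+=ul
--         elif idx == tam:
--             copy+=seg
--         else:
--             copy+=x
--     return copy
-- ===== SOURCE B (Python) =====
-- def sosa(s):
--     if not s:
--         return ""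
--     if len(s) == 1:
--         return str(ord(s))
--     chars = list(s)
--     chars[0] = str(ord(s[0]))
--     chars[1], chars[-1] = chars[-1], chars[1]
--     return "".join(chars)
-- ===== Notes on version B (the rewrite author's own statement) =====
-- stated objective: simpler
-- what changed: Replaces A's per-character enumerate loop that branches on every index with three direct index operations on a char list (encode char 0, swap positions 1 and -1) and a join.
import Mathlib
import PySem

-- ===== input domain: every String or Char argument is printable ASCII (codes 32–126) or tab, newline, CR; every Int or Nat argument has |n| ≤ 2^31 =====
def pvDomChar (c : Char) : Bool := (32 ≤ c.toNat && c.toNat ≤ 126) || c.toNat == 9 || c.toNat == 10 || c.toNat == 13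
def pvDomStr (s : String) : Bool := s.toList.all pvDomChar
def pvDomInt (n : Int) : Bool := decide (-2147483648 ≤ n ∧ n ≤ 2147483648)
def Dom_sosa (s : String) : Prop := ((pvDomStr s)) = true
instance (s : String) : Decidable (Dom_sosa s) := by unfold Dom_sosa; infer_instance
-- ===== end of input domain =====

-- B replaces A's per-character loop (branching on every index) with three direct
-- index operations on a char list; objective: simpler. Same return value everywhere.

-- ===== PORT A =====
-- the 'for idx,x in enumerate(s)' loop, step for step
def sosaLoop (tam : Nat) (pri seg ul : List Char) : Nat → List Char → List Char → List Char
  | _, [], copy => copy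
  | idx, x :: rest, copy =>
    sosaLoop tam pri seg ul (idx + 1) rest
      (if idx = 0 then copy ++ pri
       else if idx = 1 then copy ++ ul
       else if idx = tam then copy ++ seg
       else copy ++ [x])

def sosa (s : String) : String :=
  match s.toList with
  | [] => ""
  | c :: rest =>
    if rest = [] then String.ofList (PySem.Int.toChars (Int.ofNat c.toNat))
    else
      String.ofList (sosaLoop ((c :: rest).length - 1)
        (PySem.Int.toChars (Int.ofNat c.toNat))
        [(c :: rest).getD 1 ' ']                          -- s[1], index known in range
        [(c :: rest).getD ((c :: rest).length - 1) ' ']   -- s[tam], index known in range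
        0 (c :: rest) [])

-- ===== PORT B =====
-- chars[1], chars[-1] = chars[-1], chars[1]: both reads are from the original list
def swap1Last (chars : List (List Char)) : List (List Char) :=
  (chars.set 1 (chars.getD (chars.length - 1) [])).set (chars.length - 1) (chars.getD 1 [])

def sosa_alt (s : String) : String :=
  match s.toList with
  | [] => ""
  | [c] => PySem.Int.toStr (Int.ofNat c.toNat)
  | c :: rest =>
    String.ofList (swap1Last
      (((c :: rest).map (fun x => [x])).set 0 (PySem.Int.toChars (Int.ofNat c.toNat)))).flatten

-- ===== PRECONDITION & SPEC =====
def Spec_sosa (s : String) (out : String) : Prop := out = sosa_alt s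
instance (s : String) (out : String) : Decidable (Spec_sosa s out) := by unfold Spec_sosa; infer_instance

-- ===== CLAIM (what is proved, stated in full; the proofs are below) =====
def Claim_equal_sosa : Prop := ∀ (s : String), Dom_sosa s → Spec_sosa s (sosa s)

-- ===== LEMMAS AND PROOFS =====

-- the loop over the middle segment (indices 2..tam-1) copies verbatim; index tam emits seg
theorem sosaLoop_mid (tam : Nat) (pri seg ul : List Char) :
    ∀ (mid : List Char) (xl : Char) (idx : Nat) (copy : List Char),
      2 ≤ idx → idx + mid.length = tam →
      sosaLoop tam pri seg ul idx (mid ++ [xl]) copy = copy ++ mid ++ seg := by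
  intro mid
  induction mid with
  | nil =>
    intro xl idx copy h2 hlen
    simp only [List.length_nil, Nat.add_zero] at hlen
    subst hlen
    simp only [List.nil_append, sosaLoop]
    rw [if_neg (by omega : ¬ idx = 0), if_neg (by omega : ¬ idx = 1)]
    simp
  | cons m ms ih =>
    intro xl idx copy h2 hlen
    simp only [List.length_cons] at hlen
    simp only [List.cons_append, sosaLoop, if_neg (by omega : ¬ idx = 0),
      if_neg (by omega : ¬ idx = 1), if_neg (by omega : ¬ idx = tam)]
    rw [ih xl (idx + 1) (copy ++ [m]) (by omega) (by omega)]
    simp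

theorem flatten_singletons (l : List Char) : (l.map (fun x => [x])).flatten = l := by
  induction l with
  | nil => rfl
  | cons x xs ih => simp [ih]

-- B's swap on a list of shape pri :: [b] :: singletons ++ [[xl]]
theorem swap1Last_compute (pri : List Char) (b : Char) (mid : List Char) (xl : Char) :
    swap1Last (pri :: [b] :: ((mid.map fun x => [x]) ++ [[xl]])) =
      pri :: [xl] :: ((mid.map fun x => [x]) ++ [[b]]) := by
  unfold swap1Last
  have hlen : (pri :: [b] :: ((mid.map fun x => [x]) ++ [[xl]])).length - 1 = mid.length + 2 := by
    simp
  rw [hlen]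
  have hgL : (pri :: [b] :: ((mid.map fun x => [x]) ++ [[xl]])).getD (mid.length + 2)
      ([] : List Char) = [xl] := by
    simp [List.getD]
  have hg1 : (pri :: [b] :: ((mid.map fun x => [x]) ++ [[xl]])).getD 1 ([] : List Char) = [b] := by
    simp [List.getD]
  rw [hgL, hg1]
  simp only [List.set_cons_succ, List.set_cons_zero]
  congr 2
  rw [List.set_append_right _ _ (by simp)]
  simp

theorem sosa_eq (s : String) : sosa s = sosa_alt s := by
  cases h : s.toList with
  | nil => simp [sosa, sosa_alt, h]
  | cons c rest =>
    cases rest with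
    | nil =>
      simp [sosa, sosa_alt, h, PySem.Int.toStr]
    | cons b t =>
      rcases List.eq_nil_or_concat t with rfl | ⟨mid, xl, rfl⟩
      all_goals try simp only [List.concat_eq_append] at h
      · -- length-2 string: the swap is a no-op
        simp [sosa, sosa_alt, h, sosaLoop, swap1Last, List.getD]
      · -- length ≥ 3
        simp only [sosa, sosa_alt, h]
        rw [if_neg (by simp)]
        have hlen : (c :: b :: (mid ++ [xl])).length - 1 = mid.length + 2 := by simp
        have hg1 : (c :: b :: (mid ++ [xl])).getD 1 ' ' = b := by simp [List.getD]
        have hgL : (c :: b :: (mid ++ [xl])).getD (mid.length + 2) ' ' = xl := by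
          simp [List.getD]
        rw [hlen, hg1, hgL]
        -- A side: run the loop
        rw [show sosaLoop (mid.length + 2) (PySem.Int.toChars (Int.ofNat c.toNat)) [b] [xl]
              0 (c :: b :: (mid ++ [xl])) [] =
            PySem.Int.toChars (Int.ofNat c.toNat) ++ [xl] ++ mid ++ [b] from by
          simp only [sosaLoop]
          norm_num
          rw [sosaLoop_mid (mid.length + 2) _ [b] [xl] mid xl 2 _ (by omega) (by omega)]
          simp]
        -- B side
        simp only [List.map_cons, List.map_append, List.map_nil, List.set_cons_zero]
        rw [swap1Last_compute]
        simp [flatten_singletons]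

-- ===== VERDICT (by name: the statement is the Claim_ definition above) =====
theorem sosa_spec : Claim_equal_sosa := by
  intro s _
  unfold Spec_sosa
  exact sosa_eq s
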